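-- pv_equiv track=rewrite | github.com/PGCodehub/open_transfer | Sd_map.py | identify_related_ways
-- ===== SOURCE A (Python) =====
-- def identify_related_ways(ways):
--     related_ways = {}
--
--     # Convert ways to sets of node references for easier comparison
--     way_node_sets = {way_id: set(node_refs) for way_id, node_refs in ways.items()}
--
--     # Compare each pair of ways to find related ones
--     for way_id_1, node_set_1 in way_node_sets.items():
--         related_ways[way_id_1] = []
--         for way_id_2, node_set_2 in way_node_sets.items():
--             if way_id_1 != way_id_2 and node_set_1 & node_set_2:
--                 related_ways[way_id_1].append(way_id_2)
--
--     return related_ways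
-- ===== SOURCE B (Python) =====
-- def identify_related_ways(ways):
--     # Inverted index: node -> list of way ids containing that node.
--     node_to_ways = {}
--     for way_id, node_refs in ways.items():
--         for node in set(node_refs):
--             node_to_ways.setdefault(node, []).append(way_id)
--
--     related_ways = {}
--     for way_id, node_refs in ways.items():
--         # Union of all ways sharing at least one node with this way.
--         candidates = set()
--         for node in set(node_refs):
--             candidates.update(node_to_ways[node])
--         candidates.discard(way_id)
--         # Emit in the dict's insertion order (same order A produces).
--         related_ways[way_id] = [w for w in ways if w in candidates]
--     return related_ways
-- ===== Notes on version B (the rewrite author's own statement) =====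
-- stated objective: faster
-- what changed: Replaces the all-pairs set-intersection test with an inverted node-to-ways index: each way's related set is the union of the index buckets of its nodes, then emitted in dict insertion order.
import Mathlib
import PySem

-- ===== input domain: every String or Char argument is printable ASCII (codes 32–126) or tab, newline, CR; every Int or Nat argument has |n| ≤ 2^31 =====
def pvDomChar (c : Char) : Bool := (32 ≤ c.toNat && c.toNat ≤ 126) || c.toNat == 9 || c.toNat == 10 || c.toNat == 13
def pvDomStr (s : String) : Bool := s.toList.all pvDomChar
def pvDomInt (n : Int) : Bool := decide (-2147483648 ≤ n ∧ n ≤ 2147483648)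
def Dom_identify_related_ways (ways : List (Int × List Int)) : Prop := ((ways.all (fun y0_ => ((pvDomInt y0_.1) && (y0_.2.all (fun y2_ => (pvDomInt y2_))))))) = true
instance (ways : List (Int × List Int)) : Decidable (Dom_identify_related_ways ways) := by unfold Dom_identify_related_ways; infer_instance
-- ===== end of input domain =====

-- B replaces A's all-pairs set-intersection scan by an inverted node→ways index; same return value.

-- ===== PORT A =====
-- for each way, scan all ways and append every other way whose node set intersects it
def identify_related_ways (ways : List (Int × List Int)) : List (Int × List Int) :=
  let d : PySem.Dict Int (List Int) := PySem.Dict.ofList ways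
  let wns : List (Int × PySem.Set Int) := d.items.map (fun p => (p.1, PySem.Set.ofList p.2))
  (wns.foldl (fun (acc : PySem.Dict Int (List Int)) p =>
      acc.insert p.1 (wns.foldl (fun l q =>
        if p.1 != q.1 && !(PySem.Set.inter p.2 q.2).isEmpty then l ++ [q.1] else l) []))
    PySem.Dict.empty).items
-- ===== PORT B =====
def identify_related_ways_alt (ways : List (Int × List Int)) : List (Int × List Int) :=
  let d : PySem.Dict Int (List Int) := PySem.Dict.ofList ways
  let n2w : PySem.Dict Int (List Int) := d.items.foldl (fun acc p =>
      (PySem.Set.ofList p.2).foldl (fun a n => a.modify n [] (fun l => l ++ [p.1])) acc)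
    PySem.Dict.empty
  (d.items.foldl (fun (res : PySem.Dict Int (List Int)) p =>
      let cand := PySem.Set.discard
        ((PySem.Set.ofList p.2).foldl (fun s n => PySem.Set.update s (n2w.getD n [])) PySem.Set.empty)
        p.1
      res.insert p.1 (d.keys.filter (fun w => cand.contains w)))
    PySem.Dict.empty).items

-- ===== PRECONDITION & SPEC =====
def Spec_identify_related_ways (ways : List (Int × List Int)) (out : List (Int × List Int)) : Prop := out = identify_related_ways_alt ways
instance (ways : List (Int × List Int)) (out : List (Int × List Int)) : Decidable (Spec_identify_related_ways ways out) := by unfold Spec_identify_related_ways; infer_instance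

-- ===== CLAIM (what is proved, stated in full; the proofs are below) =====
def Claim_equal_identify_related_ways : Prop := ∀ (ways : List (Int × List Int)), Dom_identify_related_ways ways → Spec_identify_related_ways ways (identify_related_ways ways)

-- ===== LEMMAS AND PROOFS =====

-- one way's inner index loop: appends w to bucket n exactly when n occurs in the deduplicated node list
theorem pv_bucket_step (S : List Int) (hS : S.Nodup) (a : PySem.Dict Int (List Int)) (w n : Int) :
    (S.foldl (fun a m => a.modify m [] (fun l => l ++ [w])) a).getD n []
      = a.getD n [] ++ (if n ∈ S then [w] else []) := by
  induction S generalizing a with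
  | nil => simp
  | cons m S ih =>
    rw [List.foldl_cons, ih (List.nodup_cons.mp hS).2]
    by_cases h : n = m
    · subst h
      rw [PySem.Dict.getD_modify_self]
      have : n ∉ S := (List.nodup_cons.mp hS).1
      simp [this]
    · rw [PySem.Dict.getD_modify_of_ne _ _ _ h]
      simp [h]
-- the inverted index: bucket n lists, in order, the ids of the ways whose node list contains n
theorem pv_bucket (items : List (Int × List Int)) (acc : PySem.Dict Int (List Int)) (n : Int) :
    (items.foldl (fun acc p =>
        (PySem.Set.ofList p.2).foldl (fun a m => a.modify m [] (fun l => l ++ [p.1])) acc) acc).getD n []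
      = acc.getD n [] ++ (items.filter (fun r => n ∈ r.2)).map (·.1) := by
  induction items generalizing acc with
  | nil => simp
  | cons p items ih =>
    rw [List.foldl_cons, ih, pv_bucket_step _ (PySem.Set.nodup_ofList p.2)]
    by_cases h : n ∈ p.2 <;> simp [h, PySem.Set.mem_ofList]
-- membership in the folded union of index buckets
theorem pv_mem_union (L : List Int) (g : Int → List Int) (s0 : PySem.Set Int) (x : Int) :
    x ∈ L.foldl (fun s n => PySem.Set.update s (g n)) s0 ↔ x ∈ s0 ∨ ∃ n ∈ L, x ∈ g n := by
  induction L generalizing s0 with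
  | nil => simp
  | cons m L ih =>
    rw [List.foldl_cons, ih]
    simp [PySem.Set.mem_update, or_assoc]

theorem identify_related_ways_spec_aux (ways : List (Int × List Int)) :
    identify_related_ways ways = identify_related_ways_alt ways := by
  unfold identify_related_ways identify_related_ways_alt
  set d : PySem.Dict Int (List Int) := PySem.Dict.ofList ways with hd
  have hnodup : d.keys.Nodup := PySem.Dict.nodup_keys_ofList ways
  have hkeys : d.keys = d.items.map (·.1) := by simp only [PySem.Dict.keys]
  have hnodup' : (d.items.map (fun p => (p.1 : Int))).Nodup := by rw [← hkeys]; exact hnodup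
  rw [PySem.Dict.items_foldl_insert_fresh _ _ _ _
        (fun a _ => PySem.Dict.contains_empty a.1)
        (by rw [List.map_map]; exact hnodup'),
      PySem.Dict.items_foldl_insert_fresh _ _ _ _
        (fun a _ => PySem.Dict.contains_empty a.1) hnodup']
  simp only [List.map_map]
  refine congrArg₂ _ rfl (List.map_congr_left ?_)
  intro p hp
  refine Prod.ext rfl ?_
  show (List.map (fun p => (p.1, PySem.Set.ofList p.2)) d.items).foldl
      (fun l q => if (p.1 != q.1 && !(PySem.Set.inter (PySem.Set.ofList p.2) q.2).isEmpty) = true then l ++ [q.1] else l) []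
    = _
  simp only [PySem.List.foldl_append_if, List.filter_map, List.map_map, List.nil_append]
  rw [hkeys]
  simp only [List.filter_map]
  refine congrArg _ (List.filter_congr ?_)
  intro q hq
  show (p.1 != q.1 && !(PySem.Set.inter (PySem.Set.ofList p.2) (PySem.Set.ofList q.2)).isEmpty)
    = (PySem.Set.discard ((PySem.Set.ofList p.2).foldl (fun s n => PySem.Set.update s
        ((d.items.foldl (fun acc p =>
            (PySem.Set.ofList p.2).foldl (fun a n => a.modify n [] (fun l => l ++ [p.1])) acc)
          PySem.Dict.empty).getD n [])) PySem.Set.empty) p.1).contains q.1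
  rw [Bool.eq_iff_iff]
  simp only [Bool.and_eq_true, bne_iff_ne, Bool.not_eq_eq_eq_not, Bool.not_true,
    List.isEmpty_eq_false_iff, PySem.Set.contains, List.contains_iff_mem]
  rw [PySem.Set.mem_discard, pv_mem_union]
  constructor
  · rintro ⟨hne, hint⟩
    obtain ⟨x, hx⟩ := List.exists_mem_of_ne_nil _ hint
    rw [PySem.Set.mem_inter, PySem.Set.mem_ofList, PySem.Set.mem_ofList] at hx
    refine ⟨Or.inr ⟨x, by rw [PySem.Set.mem_ofList]; exact hx.1, ?_⟩, fun h => hne h.symm⟩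
    rw [pv_bucket, PySem.Dict.getD_empty, List.nil_append, List.mem_map]
    exact ⟨q, List.mem_filter.mpr ⟨hq, by simpa using hx.2⟩, rfl⟩
  · rintro ⟨hu, hne⟩
    rcases hu with h | ⟨n, hn, hb⟩
    · simp [PySem.Set.empty] at h
    · rw [pv_bucket, PySem.Dict.getD_empty, List.nil_append, List.mem_map] at hb
      obtain ⟨r, hr, hr1⟩ := hb
      have hrq : r = q := List.inj_on_of_nodup_map hnodup' (List.mem_filter.mp hr).1 hq hr1
      refine ⟨fun h => hne h.symm, ?_⟩
      intro hemp
      have : n ∈ PySem.Set.inter (PySem.Set.ofList p.2) (PySem.Set.ofList q.2) := by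
        rw [PySem.Set.mem_inter, PySem.Set.mem_ofList, PySem.Set.mem_ofList]
        refine ⟨by rwa [PySem.Set.mem_ofList] at hn, ?_⟩
        have := (List.mem_filter.mp hr).2
        rw [hrq] at this
        simpa using this
      rw [hemp] at this
      exact absurd this (List.not_mem_nil)

-- ===== VERDICT (by name: the statement is the Claim_ definition above) =====
theorem identify_related_ways_spec : Claim_equal_identify_related_ways := by
  intro ways _
  exact identify_related_ways_spec_aux ways
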